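-- pv_equiv track=rewrite | github.com/MostaAshour/Sudoko-Solver-with-Python | solution_2.py | get_only_possibility
-- ===== SOURCE A (Python) =====
-- import collections
--
-- def get_only_possibility(grid_dict, cells):
--     values = ''
--     for i in cells:
--         values += ''.join(grid_dict[i])
--
--     count = collections.Counter(values)
--     for val in list(filter(lambda x: count[x]==1, count)):
--         for i in cells:
--             if val in grid_dict[i]:
--                 grid_dict[i] = set(val)
--     return grid_dict
-- ===== SOURCE B (Python) =====
-- def get_only_possibility(grid_dict, cells):
--     # Sort all candidate characters, then scan runs of equal characters:
--     # a run of length 1 marks a globally unique candidate.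
--     chars = sorted(ch for cell in cells for s in grid_dict[cell] for ch in s)
--     uniques = []
--     i, n = 0, len(chars)
--     while i < n:
--         j = i
--         while j < n and chars[j] == chars[i]:
--             j += 1
--         if j == i + 1:
--             uniques.append(chars[i])
--         i = j
--     # One pass over the cells: a cell is resolved to the first of its own
--     # entries that is a unique single-character candidate.
--     result = dict(grid_dict)
--     for cell in cells:
--         hit = next((s for s in grid_dict[cell] if len(s) == 1 and s[0] in uniques), None)
--         if hit is not None:
--             result[cell] = set(hit)
--     return result
-- ===== Notes on version B (the rewrite author's own statement) =====
-- stated objective: alternative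
-- what changed: B finds the unique candidates by sorting all candidate characters and scanning runs of length 1 (instead of A's Counter hashing), then resolves the cells in a single pass in which each cell searches its own entries for a unique singleton candidate, building a fresh dict, instead of A's per-unique-value rescans and in-place overwrites of all cells.
-- outside the precondition, e.g. on get_only_possibility({'a': ['1', '2']}, ['a']): A returns {'a': {'1'}}, B returns {'a': {'1'}}
import Mathlib
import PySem

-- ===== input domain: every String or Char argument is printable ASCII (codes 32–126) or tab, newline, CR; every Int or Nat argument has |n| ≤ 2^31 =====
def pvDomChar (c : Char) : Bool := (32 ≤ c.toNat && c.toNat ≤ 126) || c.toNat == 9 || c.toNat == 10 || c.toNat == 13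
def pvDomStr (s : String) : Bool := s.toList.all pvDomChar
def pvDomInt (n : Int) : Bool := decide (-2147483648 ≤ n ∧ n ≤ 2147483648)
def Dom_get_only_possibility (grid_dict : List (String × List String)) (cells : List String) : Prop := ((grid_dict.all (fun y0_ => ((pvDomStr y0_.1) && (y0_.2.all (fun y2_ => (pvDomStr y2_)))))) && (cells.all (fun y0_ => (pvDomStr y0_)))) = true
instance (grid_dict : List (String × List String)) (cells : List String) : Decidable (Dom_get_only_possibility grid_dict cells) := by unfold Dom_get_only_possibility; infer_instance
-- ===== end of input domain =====

-- B replaces A's Counter-hashing plus per-unique-value rescans of all cells by sorting the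
-- candidate characters and scanning runs of length 1, then one pass over the cells in which each
-- cell searches its own entries for a unique candidate; equivalence is about the RETURN value
-- only — Python A mutates grid_dict in place, B builds a fresh dict.

-- ===== PORT A =====
-- uniques = list(filter(lambda x: count[x]==1, count))
def pvFilterUnique (count : PySem.Dict Char Int) : List Char :=
  count.keys.filter (fun x => count.getD x 0 == 1)

-- A's nested assignment loop: for val in uniques: for i in cells: if val in grid_dict[i]: grid_dict[i] = set(val)
def pvAssignUniques (grid_dict : List (String × List String)) (cells : List String) (uniques : List Char) : List (String × List String) :=
  (uniques.foldl (fun d val =>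
      cells.foldl (fun d i =>
        if ((d.get? i).getD []).contains (String.ofList [val]) then
          d.insert i (PySem.Set.ofList [String.ofList [val]])
        else d) d)
    (PySem.Dict.mk grid_dict)).items

-- values = ''; for i in cells: values += ''.join(grid_dict[i])   (held as its character list);
-- count = Counter(values); then the two helpers above, exactly A's steps in A's order
def get_only_possibility (grid_dict : List (String × List String)) (cells : List String) : List (String × List String) :=
  pvAssignUniques grid_dict cells
    (pvFilterUnique (PySem.Dict.counter
      (cells.foldl (fun acc i =>
        acc ++ (PySem.Str.join "" (((PySem.Dict.mk grid_dict).get? i).getD [])).toList) [])))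

-- ===== PORT B =====
-- Source B's while loop over the sorted character list: i advances run by run (the inner while is the
-- takeWhile/dropWhile split at the run's head); a run of length exactly 1 appends its character.
def pvRunScan (l : List Char) : List Char :=
  match l with
  | [] => []
  | c :: rest =>
    (if rest.takeWhile (fun x => x == c) = [] then [c] else []) ++
      pvRunScan (rest.dropWhile (fun x => x == c))
termination_by l.length
decreasing_by
  simp only [List.length_cons]
  exact Nat.lt_succ_of_le (List.length_dropWhile_le _ _)

-- Source B's per-entry test 'len(s) == 1 and s[0] in uniques'
def pvQ (uniques : List Char) (s : String) : Bool :=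
  match s.toList with
  | [u] => uniques.contains u
  | _ => false

-- the character generator 'ch for cell in cells for s in grid_dict[cell] for ch in s'
def pvCellChars (grid_dict : List (String × List String)) (cells : List String) : List Char :=
  cells.flatMap (fun c => (((PySem.Dict.mk grid_dict).get? c).getD []).flatMap String.toList)

-- Source B's final loop: result = dict(grid_dict) updated in ONE pass over the cells;
-- next(...) is find? over the cell's own entries; set(hit) for the length-1 hit is {hit}.
def pvResolveCells (grid_dict : List (String × List String)) (cells : List String) (uniques : List Char) : List (String × List String) :=
  (cells.foldl (fun r cell =>
      match (((PySem.Dict.mk grid_dict).get? cell).getD []).find? (pvQ uniques) with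
      | some s => r.insert cell (PySem.Set.ofList (s.toList.map (fun c => String.ofList [c])))
      | none => r) (PySem.Dict.mk grid_dict)).items

-- chars = sorted(all candidate characters); uniques by the run scan; then the resolution pass
def get_only_possibility_alt (grid_dict : List (String × List String)) (cells : List String) : List (String × List String) :=
  pvResolveCells grid_dict cells
    (pvRunScan (PySem.List.sorted (pvCellChars grid_dict cells) (fun x => x) false))

-- ===== PRECONDITION & SPEC =====
-- s is a one-character entry whose character occurs exactly once overall
def pvUniqueElem (chars : List Char) (s : String) : Bool :=
  match s.toList with
  | [u] => chars.count u == 1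
  | _ => false

-- Pre_ excludes: a cell missing from grid_dict (A raises KeyError); duplicate keys (a Python dict
-- always has distinct keys, so such association lists represent no Python input); and a cell that
-- contains two distinct globally-unique one-character candidates, where the Python result depends
-- on the unspecified set iteration order (both A's and B's values are accidental there).
def Pre_get_only_possibility (grid_dict : List (String × List String)) (cells : List String) : Prop :=
  (grid_dict.map Prod.fst).Nodup ∧
  (∀ c ∈ cells, c ∈ grid_dict.map Prod.fst) ∧
  (∀ c ∈ cells,
    ((((PySem.Dict.mk grid_dict).get? c).getD []).filter
        (pvUniqueElem (pvCellChars grid_dict cells))).length ≤ 1)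
instance (grid_dict : List (String × List String)) (cells : List String) : Decidable (Pre_get_only_possibility grid_dict cells) := by unfold Pre_get_only_possibility; infer_instance

def pvWitness_get_only_possibility : (List (String × List String)) × List String :=
  ([("a", ["12", "3"]), ("b", ["12"])], ["a", "b"])

def Spec_get_only_possibility (grid_dict : List (String × List String)) (cells : List String) (out : List (String × List String)) : Prop := out = get_only_possibility_alt grid_dict cells
instance (grid_dict : List (String × List String)) (cells : List String) (out : List (String × List String)) : Decidable (Spec_get_only_possibility grid_dict cells out) := by unfold Spec_get_only_possibility; infer_instance

-- ===== CLAIM (what is proved, stated in full; the proofs are below) =====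
def Claim_equal_get_only_possibility : Prop := ∀ (grid_dict : List (String × List String)) (cells : List String), Dom_get_only_possibility grid_dict cells → Pre_get_only_possibility grid_dict cells → Spec_get_only_possibility grid_dict cells (get_only_possibility grid_dict cells)

-- ===== LEMMAS AND PROOFS =====

-- A's unique candidate characters, in first-appearance order
def pvUniques (grid_dict : List (String × List String)) (cells : List String) : List Char :=
  (PySem.Set.ofList (pvCellChars grid_dict cells)).filter
    (fun x => ((pvCellChars grid_dict cells).count x : Int) == 1)

-- one A-step of one unique candidate on one cell value
def pvBu (u : Char) (v : List String) : List String :=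
  if v.contains (String.ofList [u]) then [String.ofList [u]] else v

-- A's per-cell evolution over the whole uniques list
def pvProcA (U : List Char) (v : List String) : List String := U.foldl (fun v u => pvBu u v) v

-- A's per-cell first-match rule (intermediate characterization of pvProcA)
def pvFirst (U : List Char) (v : List String) : List String :=
  match U.find? (fun u => v.contains (String.ofList [u])) with
  | some u => [String.ofList [u]]
  | none => v

-- B's per-cell resolution: first entry of v that is a unique singleton candidate
def pvG (Us : List Char) (v : List String) : List String :=
  match v.find? (pvQ Us) with
  | some s => s.toList.map (fun c => String.ofList [c])
  | none => v

-- map a value transformation over an association list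
def pvMapd (grid : List (String × List String)) (F : String → List String → List String) : List (String × List String) :=
  grid.map (fun p => (p.1, F p.1 p.2))

lemma pvMapd_congr {grid : List (String × List String)} {F G : String → List String → List String}
    (h : ∀ p ∈ grid, F p.1 p.2 = G p.1 p.2) : pvMapd grid F = pvMapd grid G := by
  unfold pvMapd
  exact List.map_congr_left (fun p hp => by rw [h p hp])

lemma pvGet?_mk_map (grid : List (String × List String)) (F : String → List String → List String)
    (k : String) :
    (PySem.Dict.mk (pvMapd grid F)).get? k = ((PySem.Dict.mk grid).get? k).map (F k) := by
  induction grid with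
  | nil => rfl
  | cons p l ih =>
    simp only [pvMapd, List.map_cons] at *
    rw [PySem.Dict.get?_mk_cons, PySem.Dict.get?_mk_cons]
    by_cases hb : p.1 = k
    · subst hb; simp
    · simp only [beq_iff_eq, hb, if_false, ih]

lemma pvEntry_val {grid : List (String × List String)} (hnd : (grid.map Prod.fst).Nodup)
    {c : String} {w : List String} (hg : (PySem.Dict.mk grid).get? c = some w)
    {p : String × List String} (hp : p ∈ grid) (hpc : p.1 = c) : p.2 = w := by
  have hkeys : (PySem.Dict.mk grid).keys.Nodup := by
    rw [PySem.Dict.keys_mk]; exact hnd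
  have : (PySem.Dict.mk grid).get? p.1 = some p.2 :=
    PySem.Dict.get?_of_mem_items _ (by exact hp) hkeys
  rw [hpc, hg] at this
  exact (Option.some_inj.mp this).symm

lemma pvNotMem_of_get?_none {grid : List (String × List String)} {c : String}
    (hg : (PySem.Dict.mk grid).get? c = none) {p : String × List String} (hp : p ∈ grid) :
    p.1 ≠ c := by
  intro hpc
  have : c ∉ (PySem.Dict.mk grid).keys := (PySem.Dict.get?_eq_none_iff_not_mem_keys _ _).mp hg
  rw [PySem.Dict.keys_mk] at this
  exact this (hpc ▸ List.mem_map_of_mem hp)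

lemma pvBu_idem (u : Char) (v : List String) : pvBu u (pvBu u v) = pvBu u v := by
  unfold pvBu
  by_cases h : String.ofList [u] ∈ v
  · simp [h]
  · simp [h]

lemma pvSet_singleton (s : String) : PySem.Set.ofList [s] = [s] := rfl

-- A's inner loop over the cells, for one unique candidate
lemma pvAinner (grid : List (String × List String)) (hnd : (grid.map Prod.fst).Nodup) (u : Char) :
    ∀ (cs : List String) (F : String → List String → List String),
    cs.foldl (fun d i =>
        if ((d.get? i).getD []).contains (String.ofList [u]) then
          d.insert i (PySem.Set.ofList [String.ofList [u]])
        else d) (PySem.Dict.mk (pvMapd grid F))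
    = PySem.Dict.mk (pvMapd grid (fun k v => if cs.contains k then pvBu u (F k v) else F k v)) := by
  intro cs
  induction cs with
  | nil =>
    intro F
    simp only [List.foldl_nil]
    exact congrArg _ (pvMapd_congr (fun p _ => by simp))
  | cons c cs ih =>
    intro F
    simp only [List.foldl_cons]
    rcases hg : (PySem.Dict.mk grid).get? c with _ | w
    · -- cell not a key: step is the identity
      have hnone : (PySem.Dict.mk (pvMapd grid F)).get? c = none := by
        rw [pvGet?_mk_map, hg]; rfl
      rw [hnone]
      simp only [Option.getD_none]
      rw [if_neg (by simp)]
      rw [ih F]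
      refine congrArg _ (pvMapd_congr (fun p hp => ?_))
      have hne : p.1 ≠ c := pvNotMem_of_get?_none hg hp
      simp [hne]
    · have hsome : (PySem.Dict.mk (pvMapd grid F)).get? c = some (F c w) := by
        rw [pvGet?_mk_map, hg]; rfl
      rw [hsome]
      simp only [Option.getD_some]
      by_cases hcont : (F c w).contains (String.ofList [u]) = true
      · -- the candidate is present: the entry of c is overwritten
        rw [if_pos hcont]
        have hc2 : (PySem.Dict.mk (pvMapd grid F)).contains c = true := by
          rw [PySem.Dict.contains_eq_isSome_get?, hsome]; rfl
        have hins : (PySem.Dict.mk (pvMapd grid F)).insert c (PySem.Set.ofList [String.ofList [u]])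
            = PySem.Dict.mk (pvMapd grid (fun k v => if k = c then pvBu u (F k v) else F k v)) := by
          apply PySem.Dict.ext
          rw [PySem.Dict.items_insert_of_contains _ _ hc2]
          show (pvMapd grid F).map _ = _
          unfold pvMapd
          rw [List.map_map]
          refine List.map_congr_left (fun p hp => ?_)
          by_cases hpc : p.1 = c
          · have hw : p.2 = w := pvEntry_val hnd hg hp hpc
            have hmem : String.ofList [u] ∈ F c w := by simpa using hcont
            simp [Function.comp, hpc, hw, pvBu, hmem, pvSet_singleton]
          · simp [Function.comp, hpc]
        rw [hins, ih]
        refine congrArg _ (pvMapd_congr (fun p _ => ?_))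
        by_cases hpc : p.1 = c
        · simp [hpc, pvBu_idem]
        · simp [hpc]
      · -- candidate absent from the entry of c: step is the identity
        rw [if_neg hcont, ih]
        refine congrArg _ (pvMapd_congr (fun p hp => ?_))
        by_cases hpc : p.1 = c
        · have hw : p.2 = w := pvEntry_val hnd hg hp hpc
          have hbu : pvBu u (F c w) = F c w := by
            unfold pvBu; rw [if_neg hcont]
          simp [hpc, hw, hbu]
        · simp [hpc]

-- A's outer loop over the unique candidates
lemma pvAouter (grid : List (String × List String)) (hnd : (grid.map Prod.fst).Nodup)
    (cells : List String) :
    ∀ (U : List Char) (F : String → List String → List String),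
    U.foldl (fun d val =>
        cells.foldl (fun d i =>
          if ((d.get? i).getD []).contains (String.ofList [val]) then
            d.insert i (PySem.Set.ofList [String.ofList [val]])
          else d) d) (PySem.Dict.mk (pvMapd grid F))
    = PySem.Dict.mk (pvMapd grid (fun k v => if cells.contains k then pvProcA U (F k v) else F k v)) := by
  intro U
  induction U with
  | nil =>
    intro F
    simp only [List.foldl_nil]
    exact congrArg _ (pvMapd_congr (fun p _ => by simp [pvProcA]))
  | cons u us ih =>
    intro F
    simp only [List.foldl_cons]
    rw [pvAinner grid hnd u cells F, ih]
    refine congrArg _ (pvMapd_congr (fun p _ => ?_))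
    by_cases hc : p.1 ∈ cells
    · simp [hc, pvProcA]
    · simp [hc]

-- B's single pass over the cells
lemma pvBfold (grid : List (String × List String)) (hnd : (grid.map Prod.fst).Nodup)
    (Us : List Char) :
    ∀ (cs : List String) (F : String → List String → List String),
    (∀ k v, F k v = v ∨ F k v = pvG Us v) →
    cs.foldl (fun r cell =>
        match (((PySem.Dict.mk grid).get? cell).getD []).find? (pvQ Us) with
        | some s => r.insert cell (PySem.Set.ofList (s.toList.map (fun c => String.ofList [c])))
        | none => r) (PySem.Dict.mk (pvMapd grid F))
    = PySem.Dict.mk (pvMapd grid (fun k v => if cs.contains k then pvG Us v else F k v)) := by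
  intro cs
  induction cs with
  | nil =>
    intro F _
    simp only [List.foldl_nil]
    exact congrArg _ (pvMapd_congr (fun p _ => by simp))
  | cons c cs ih =>
    intro F hF
    simp only [List.foldl_cons]
    rcases hg : (PySem.Dict.mk grid).get? c with _ | w
    · -- cell not a key: find? scans the empty list
      simp only [hg, Option.getD_none]
      rw [show ([] : List String).find? (pvQ Us) = none from rfl]
      rw [ih F hF]
      refine congrArg _ (pvMapd_congr (fun p hp => ?_))
      have hne : p.1 ≠ c := pvNotMem_of_get?_none hg hp
      simp [hne]
    · simp only [hg, Option.getD_some]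
      rcases hf : w.find? (pvQ Us) with _ | s
      · -- no entry of this cell is a unique singleton candidate
        simp only [hf]
        have hgv : pvG Us w = w := by unfold pvG; rw [hf]
        have hstep : PySem.Dict.mk (pvMapd grid F) =
            PySem.Dict.mk (pvMapd grid (fun k v => if k = c then pvG Us v else F k v)) := by
          refine congrArg _ (pvMapd_congr (fun p hp => ?_))
          by_cases hpc : p.1 = c
          · have hw : p.2 = w := pvEntry_val hnd hg hp hpc
            rw [if_pos hpc, hw, hgv]
            rcases hF p.1 w with h | h
            · exact h
            · rw [h, hgv]
          · rw [if_neg hpc]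
        rw [hstep, ih _ (fun k v => by
          by_cases hkc : k = c
          · right; rw [if_pos hkc]
          · rcases hF k v with h | h
            · left; rw [if_neg hkc]; exact h
            · right; rw [if_neg hkc]; exact h)]
        refine congrArg _ (pvMapd_congr (fun p _ => ?_))
        by_cases hpc : p.1 = c
        · simp [hpc]
        · simp [hpc]
      · -- first matching entry s: overwrite the entry of c with set(s)
        simp only [hf]
        have hqs : pvQ Us s = true := List.find?_some hf
        obtain ⟨u, hu⟩ : ∃ u, s.toList = [u] := by
          unfold pvQ at hqs
          rcases ht : s.toList with _ | ⟨u, t⟩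
          · rw [ht] at hqs; simp at hqs
          · cases t with
            | nil => exact ⟨u, rfl⟩
            | cons _ _ => rw [ht] at hqs; simp at hqs
        have hval : PySem.Set.ofList (s.toList.map (fun c => String.ofList [c]))
            = [String.ofList [u]] := by rw [hu]; rfl
        have hgv : pvG Us w = [String.ofList [u]] := by
          unfold pvG
          rw [hf]
          show s.toList.map (fun c => String.ofList [c]) = _
          rw [hu]; rfl
        have hc2 : (PySem.Dict.mk (pvMapd grid F)).contains c = true := by
          rw [PySem.Dict.contains_eq_isSome_get?, pvGet?_mk_map, hg]; rfl
        have hins : (PySem.Dict.mk (pvMapd grid F)).insert c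
              (PySem.Set.ofList (s.toList.map (fun c => String.ofList [c])))
            = PySem.Dict.mk (pvMapd grid (fun k v => if k = c then pvG Us v else F k v)) := by
          apply PySem.Dict.ext
          rw [PySem.Dict.items_insert_of_contains _ _ hc2]
          show (pvMapd grid F).map _ = _
          unfold pvMapd
          rw [List.map_map]
          refine List.map_congr_left (fun p hp => ?_)
          by_cases hpc : p.1 = c
          · have hw : p.2 = w := pvEntry_val hnd hg hp hpc
            simp [Function.comp, hpc, hw, hval, hgv]
          · simp [Function.comp, hpc]
        rw [hins, ih _ (fun k v => by
          by_cases hkc : k = c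
          · right; rw [if_pos hkc]
          · rcases hF k v with h | h
            · left; rw [if_neg hkc]; exact h
            · right; rw [if_neg hkc]; exact h)]
        refine congrArg _ (pvMapd_congr (fun p _ => ?_))
        by_cases hpc : p.1 = c
        · simp [hpc]
        · simp [hpc]

lemma pvProcA_fix (u : Char) : ∀ (us : List Char), (∀ u' ∈ us, u' ≠ u) →
    pvProcA us [String.ofList [u]] = [String.ofList [u]] := by
  intro us
  induction us with
  | nil => intro _; rfl
  | cons u' us ih =>
    intro h
    have hne : u' ≠ u := h u' (List.mem_cons_self ..)
    have hstr : String.ofList [u'] ≠ String.ofList [u] := by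
      intro hc
      exact hne (by simpa using congrArg String.toList hc)
    unfold pvProcA
    simp only [List.foldl_cons]
    have hb : pvBu u' [String.ofList [u]] = [String.ofList [u]] := by
      unfold pvBu
      rw [if_neg (by simp [hstr])]
    rw [hb]
    exact ih (fun x hx => h x (List.mem_cons_of_mem _ hx))

-- on a duplicate-free uniques list, A's per-cell evolution is the first-match rule
lemma pvProcA_eq_first : ∀ (U : List Char), U.Nodup → ∀ (v : List String),
    pvProcA U v = pvFirst U v := by
  intro U
  induction U with
  | nil => intro _ v; rfl
  | cons u us ih =>
    intro hnd v
    unfold pvProcA pvFirst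
    simp only [List.foldl_cons]
    by_cases h : v.contains (String.ofList [u]) = true
    · simp only [List.find?_cons_of_pos (p := fun u => v.contains (String.ofList [u])) h]
      have hbu : pvBu u v = [String.ofList [u]] := by unfold pvBu; rw [if_pos h]
      rw [hbu]
      exact pvProcA_fix u us (fun u' hu' hc => (List.nodup_cons.mp hnd).1 (hc ▸ hu'))
    · have hm : String.ofList [u] ∉ v := by simpa using h
      rw [List.find?_cons_of_neg (p := fun u => v.contains (String.ofList [u])) (by simp [hm])]
      have hbu : pvBu u v = v := by unfold pvBu; rw [if_neg h]
      rw [hbu]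
      exact ih (List.nodup_cons.mp hnd).2 v

lemma pvUniques_nodup (grid_dict : List (String × List String)) (cells : List String) :
    (pvUniques grid_dict cells).Nodup := by
  unfold pvUniques
  exact (PySem.Set.nodup_ofList _).filter _

-- membership in A's uniques list is 'occurs exactly once'
lemma pvUniques_mem (grid_dict : List (String × List String)) (cells : List String) (u : Char) :
    u ∈ pvUniques grid_dict cells ↔ (pvCellChars grid_dict cells).count u = 1 := by
  unfold pvUniques
  rw [List.mem_filter, PySem.Set.mem_ofList]
  constructor
  · rintro ⟨-, h⟩
    have h' : ((pvCellChars grid_dict cells).count u : Int) = 1 := by simpa using h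
    exact_mod_cast h'
  · intro h
    refine ⟨List.count_pos_iff.mp (by omega), by simp [h]⟩

-- in a sorted list all of whose elements are ≥ c, dropping the leading c-run drops every c
lemma pvNotMemDrop (c : Char) : ∀ (l : List Char), l.Pairwise (· ≤ ·) → (∀ x ∈ l, c ≤ x) →
    c ∉ l.dropWhile (fun x => x == c) := by
  intro l
  induction l with
  | nil => intro _ _ h; simp at h
  | cons a t ih =>
    intro hp hle hc
    by_cases ha : (a == c) = true
    · rw [List.dropWhile_cons_of_pos (p := fun x => x == c) ha] at hc
      exact ih (List.pairwise_cons.mp hp).2 (fun x hx => hle x (List.mem_cons_of_mem _ hx)) hc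
    · rw [List.dropWhile_cons_of_neg (p := fun x => x == c) ha] at hc
      have hac : a ≠ c := by simpa using ha
      rcases List.mem_cons.mp hc with h | h
      · exact hac h.symm
      · have h1 : a ≤ c := (List.pairwise_cons.mp hp).1 c h
        have h2 : c ≤ a := hle a (List.mem_cons_self ..)
        exact hac (le_antisymm h1 h2)

-- the run scan of a sorted list collects exactly the characters of count 1
lemma pvRunScan_mem : ∀ (n : Nat) (l : List Char), l.length ≤ n → l.Pairwise (· ≤ ·) →
    ∀ u, u ∈ pvRunScan l ↔ l.count u = 1 := by
  intro n
  induction n with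
  | zero =>
    intro l hl _ u
    rw [List.length_eq_zero_iff.mp (Nat.le_zero.mp hl)]
    simp [pvRunScan]
  | succ n ih =>
    intro l hl hp u
    match l with
    | [] => simp [pvRunScan]
    | c :: rest =>
      rw [pvRunScan]
      have hRD : rest.takeWhile (fun x => x == c) ++ rest.dropWhile (fun x => x == c) = rest :=
        List.takeWhile_append_dropWhile
      set R := rest.takeWhile (fun x => x == c) with hR
      set D := rest.dropWhile (fun x => x == c) with hD
      have hRc : ∀ x ∈ R, x = c := by
        intro x hx
        have := List.mem_takeWhile_imp hx
        simpa using this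
      have hrestle : ∀ x ∈ rest, c ≤ x := (List.pairwise_cons.mp hp).1
      have hDsub : D.Sublist rest := List.dropWhile_sublist _
      have hpD : D.Pairwise (· ≤ ·) :=
        ((List.pairwise_cons.mp hp).2).sublist hDsub
      have hcD : c ∉ D := pvNotMemDrop c rest (List.pairwise_cons.mp hp).2 hrestle
      have hcountR : R.count c = R.length := List.count_eq_length.mpr (fun b hb => (hRc b hb).symm)
      have hcountcD : D.count c = 0 := List.count_eq_zero.mpr hcD
      have hIH : ∀ u, u ∈ pvRunScan D ↔ D.count u = 1 := by
        refine ih D ?_ hpD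
        have h1 : D.length ≤ rest.length := List.length_dropWhile_le _ _
        have h2 : rest.length + 1 ≤ n + 1 := by simpa using hl
        omega
      by_cases huc : u = c
      · subst huc
        have hcount : (u :: rest).count u = 1 + R.length := by
          rw [List.count_cons_self, ← hRD, List.count_append, hcountR, hcountcD]
          omega
        rw [hcount]
        have hnotin : u ∉ pvRunScan D := fun hc =>
          by have := (hIH u).mp hc; omega
        by_cases hRe : R = []
        · rw [if_pos hRe, hRe]
          simp [hnotin]
        · rw [if_neg hRe]
          simp only [List.nil_append]
          constructor
          · intro h; exact absurd h hnotin
          · intro h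
            have hR0 : R.length = 0 := by omega
            exact absurd (List.length_eq_zero_iff.mp hR0) hRe
      · have hcount : (c :: rest).count u = D.count u := by
          rw [List.count_cons_of_ne (Ne.symm huc), ← hRD, List.count_append]
          have : R.count u = 0 := List.count_eq_zero.mpr (fun hc => huc (hRc u hc))
          omega
        rw [hcount, List.mem_append, ← hIH u]
        constructor
        · rintro (h | h)
          · exfalso
            by_cases hRe : R = [] <;> simp [hRe] at h
            exact huc h
          · exact h
        · intro h; exact Or.inr h

-- membership in B's uniques list agrees with A's
lemma pvBuniques_mem (grid_dict : List (String × List String)) (cells : List String) (u : Char) :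
    u ∈ pvRunScan (PySem.List.sorted (pvCellChars grid_dict cells) (fun x => x) false)
      ↔ (pvCellChars grid_dict cells).count u = 1 := by
  rw [pvRunScan_mem (PySem.List.sorted (pvCellChars grid_dict cells) (fun x => x) false).length _
    le_rfl (PySem.List.sorted_pairwise _ _) u]
  exact Iff.of_eq (congrArg (· = 1)
    ((PySem.List.sorted_perm (pvCellChars grid_dict cells) (fun x => x) false).count_eq u))

-- a filter of length ≤ 1 pins any two satisfying members to be equal
lemma pvFilter_le_one {l : List String} {p : String → Bool}
    (h : (l.filter p).length ≤ 1) {a b : String}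
    (ha : a ∈ l) (hb : b ∈ l) (hpa : p a = true) (hpb : p b = true) : a = b := by
  have ha' : a ∈ l.filter p := List.mem_filter.mpr ⟨ha, hpa⟩
  have hb' : b ∈ l.filter p := List.mem_filter.mpr ⟨hb, hpb⟩
  match hl : l.filter p with
  | [] => rw [hl] at ha'; cases ha'
  | [x] =>
    rw [hl] at ha' hb'
    simp only [List.mem_singleton] at ha' hb'
    rw [ha', hb']
  | x :: y :: t => rw [hl] at h; simp at h

-- under the at-most-one-unique-candidate-per-cell condition, A's first-match rule over its
-- uniques list is B's search of the cell's own entries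
lemma pvFirst_eq_pvG (chars : List Char) (U Us : List Char)
    (hU : ∀ u, u ∈ U ↔ chars.count u = 1)
    (hUs : ∀ u, u ∈ Us ↔ chars.count u = 1)
    (v : List String)
    (hv : (v.filter (pvUniqueElem chars)).length ≤ 1) :
    pvFirst U v = pvG Us v := by
  have hq : pvQ Us = pvUniqueElem chars := by
    funext s
    unfold pvQ pvUniqueElem
    match ht : s.toList with
    | [] => rfl
    | [u] =>
      simp only []
      rw [Bool.eq_iff_iff]
      simp only [List.contains_iff_mem, beq_iff_eq]
      exact hUs u
    | _ :: _ :: _ => rfl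
  unfold pvFirst pvG
  rw [hq]
  rcases hf : v.find? (pvUniqueElem chars) with _ | s₀
  · -- no unique singleton entry in v: neither side changes it
    have hnone : U.find? (fun u => v.contains (String.ofList [u])) = none := by
      rw [List.find?_eq_none]
      intro u hu hcontains
      have hmem : String.ofList [u] ∈ v := by simpa using hcontains
      have hcnt : chars.count u = 1 := (hU u).mp hu
      have hp : pvUniqueElem chars (String.ofList [u]) = true := by
        unfold pvUniqueElem
        simp [hcnt]
      exact absurd hp (by simpa using List.find?_eq_none.mp hf _ hmem)
    rw [hnone]
  · -- B found the unique singleton entry s₀; A's first-match rule finds the same value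
    have hps₀ : pvUniqueElem chars s₀ = true := List.find?_some hf
    have hmem₀ : s₀ ∈ v := List.mem_of_find?_eq_some hf
    obtain ⟨u₀, hu₀, hc₀⟩ : ∃ u, s₀.toList = [u] ∧ chars.count u = 1 := by
      unfold pvUniqueElem at hps₀
      match ht : s₀.toList with
      | [] => rw [ht] at hps₀; cases hps₀
      | [u] =>
        rw [ht] at hps₀
        exact ⟨u, rfl, by simpa using hps₀⟩
      | _ :: _ :: _ => rw [ht] at hps₀; cases hps₀
    have hs₀ : s₀ = String.ofList [u₀] := by
      have := congrArg String.ofList hu₀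
      simpa using this
    have hexists : ∃ u ∈ U, v.contains (String.ofList [u]) = true := by
      refine ⟨u₀, (hU u₀).mpr hc₀, ?_⟩
      rw [← hs₀]
      simpa using hmem₀
    obtain ⟨u₁, hfind₁⟩ : ∃ u₁, U.find? (fun u => v.contains (String.ofList [u])) = some u₁ := by
      rcases hfn : U.find? (fun u => v.contains (String.ofList [u])) with _ | u₁
      · obtain ⟨u, hu, hcont⟩ := hexists
        exact absurd hcont (by simpa using List.find?_eq_none.mp hfn u hu)
      · exact ⟨u₁, rfl⟩
    rw [hfind₁]
    have hmem₁ : String.ofList [u₁] ∈ v := by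
      have := List.find?_some hfind₁
      simpa using this
    have hc₁ : chars.count u₁ = 1 := (hU u₁).mp (List.mem_of_find?_eq_some hfind₁)
    have hp₁ : pvUniqueElem chars (String.ofList [u₁]) = true := by
      unfold pvUniqueElem
      simp [hc₁]
    have heq : String.ofList [u₁] = s₀ := pvFilter_le_one hv hmem₁ hmem₀ hp₁ hps₀
    show [String.ofList [u₁]] = s₀.toList.map (fun c => String.ofList [c])
    rw [hu₀, List.map_cons, List.map_nil, heq, ← hs₀]

lemma pvJoin_empty_sep : ∀ (ps : List (List Char)), PySem.Chars.join [] ps = ps.flatten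
  | [] => by simp [PySem.Chars.join_nil]
  | [a] => by simp [PySem.Chars.join_singleton]
  | a :: b :: ps => by
    rw [PySem.Chars.join_cons_cons, pvJoin_empty_sep (b :: ps)]
    simp

-- A's accumulated candidate string is pvCellChars
lemma pvValues_eq (grid_dict : List (String × List String)) (cells : List String) :
    cells.foldl (fun acc i =>
        acc ++ (PySem.Str.join "" (((PySem.Dict.mk grid_dict).get? i).getD [])).toList) []
    = pvCellChars grid_dict cells := by
  rw [PySem.List.foldl_append_eq_flatMap]
  unfold pvCellChars
  simp only [List.nil_append]
  refine List.flatMap_congr (fun i _ => ?_)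
  rw [PySem.Str.toList_join]
  show PySem.Chars.join [] _ = _
  rw [pvJoin_empty_sep, ← List.flatMap_def]

-- A's uniques list is pvUniques
lemma pvAuniques (grid_dict : List (String × List String)) (cells : List String) :
    ((PySem.Dict.counter (pvCellChars grid_dict cells)).keys).filter
        (fun x => (PySem.Dict.counter (pvCellChars grid_dict cells)).getD x 0 == 1)
    = pvUniques grid_dict cells := by
  rw [PySem.Dict.keys_counter]
  unfold pvUniques
  exact List.filter_congr (fun x _ => by rw [PySem.Dict.getD_counter])

lemma pvMapd_id (grid : List (String × List String)) : pvMapd grid (fun _ v => v) = grid := by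
  unfold pvMapd
  simp

-- characterization of port A
lemma pvA_char (grid_dict : List (String × List String)) (cells : List String)
    (hnd : (grid_dict.map Prod.fst).Nodup) :
    get_only_possibility grid_dict cells
    = pvMapd grid_dict (fun k v =>
        if cells.contains k then pvProcA (pvUniques grid_dict cells) v else v) := by
  unfold get_only_possibility pvFilterUnique pvAssignUniques
  rw [pvValues_eq, pvAuniques]
  have ha := pvAouter grid_dict hnd cells (pvUniques grid_dict cells) (fun _ v => v)
  rw [pvMapd_id] at ha
  rw [ha]

-- characterization of port B
lemma pvB_char (grid_dict : List (String × List String)) (cells : List String)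
    (hnd : (grid_dict.map Prod.fst).Nodup) :
    get_only_possibility_alt grid_dict cells
    = pvMapd grid_dict (fun k v =>
        if cells.contains k then
          pvG (pvRunScan (PySem.List.sorted (pvCellChars grid_dict cells) (fun x => x) false)) v
        else v) := by
  unfold get_only_possibility_alt pvResolveCells
  have hb := pvBfold grid_dict hnd
    (pvRunScan (PySem.List.sorted (pvCellChars grid_dict cells) (fun x => x) false))
    cells (fun _ v => v) (fun _ _ => Or.inl rfl)
  rw [pvMapd_id] at hb
  rw [hb]

-- ===== VERDICT (by name: the statement is the Claim_ definition above) =====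
theorem get_only_possibility_spec : Claim_equal_get_only_possibility := by
  intro grid_dict cells _ hpre
  obtain ⟨hnd, -, hcell⟩ := hpre
  unfold Spec_get_only_possibility
  rw [pvA_char grid_dict cells hnd, pvB_char grid_dict cells hnd]
  refine pvMapd_congr (fun p hp => ?_)
  by_cases hc : cells.contains p.1 = true
  · rw [if_pos hc, if_pos hc,
      pvProcA_eq_first _ (pvUniques_nodup grid_dict cells)]
    have hcmem : p.1 ∈ cells := by simpa using hc
    have hget : (PySem.Dict.mk grid_dict).get? p.1 = some p.2 :=
      PySem.Dict.get?_of_mem_items _ hp (by rw [PySem.Dict.keys_mk]; exact hnd)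
    have hv := hcell p.1 hcmem
    rw [hget] at hv
    exact pvFirst_eq_pvG (pvCellChars grid_dict cells) _ _
      (pvUniques_mem grid_dict cells)
      (pvBuniques_mem grid_dict cells)
      p.2 (by simpa using hv)
  · rw [if_neg hc, if_neg hc]
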